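-- pv_equiv track=rewrite | github.com/iDC-NEU/NeutronBench | exp/exp-batch-size/draw-mix-fig11.py | split_list_best
-- ===== SOURCE A (Python) =====
-- def split_list_best(X, Y, best_acc):
--     retX, retY = [], []
--     for arrx, arry in zip(X, Y):
--         tmpx, tmpy = [], []
--         for i in range(len(arrx)):
--             x, y = arrx[i], arry[i]
--             tmpx.append(x)
--             tmpy.append(y)
--             if y >= best_acc:
--                 # tmpy[-1] = best_acc
--                 break
--         retX.append(tmpx)
--         retY.append(tmpy)
--     return retX, retY
-- ===== SOURCE B (Python) =====
-- def split_list_best(X, Y, best_acc):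
--     def cut(ax, ay):
--         return next((i + 1 for i in range(len(ax)) if ay[i] >= best_acc), len(ax))
--     cuts = [cut(ax, ay) for ax, ay in zip(X, Y)]
--     return [ax[:c] for ax, c in zip(X, cuts)], [ay[:c] for ay, c in zip(Y, cuts)]
-- ===== Notes on version B (the rewrite author's own statement) =====
-- stated objective: alternative
-- what changed: B is staged and fold-free: it first computes the list of cut lengths (first index with y >= best_acc plus one, else full length) by a comprehension over zip(X, Y), then builds both outputs as bulk-slice comprehensions over zip with the cut list, instead of A's single pass that grows retX/retY by element-wise dual appends with a break inside the copy loop.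
import Mathlib
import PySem

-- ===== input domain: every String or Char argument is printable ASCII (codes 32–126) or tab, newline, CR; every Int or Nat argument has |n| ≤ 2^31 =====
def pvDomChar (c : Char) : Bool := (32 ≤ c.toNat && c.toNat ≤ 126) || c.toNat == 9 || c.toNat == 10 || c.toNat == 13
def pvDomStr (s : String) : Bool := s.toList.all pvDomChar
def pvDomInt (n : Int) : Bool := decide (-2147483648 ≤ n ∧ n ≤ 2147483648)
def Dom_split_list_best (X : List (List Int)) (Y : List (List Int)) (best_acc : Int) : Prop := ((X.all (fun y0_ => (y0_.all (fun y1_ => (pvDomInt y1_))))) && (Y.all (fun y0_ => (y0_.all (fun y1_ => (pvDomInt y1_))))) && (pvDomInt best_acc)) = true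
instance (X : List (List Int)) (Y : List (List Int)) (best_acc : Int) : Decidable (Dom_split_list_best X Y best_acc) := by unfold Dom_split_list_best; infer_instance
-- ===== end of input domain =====

-- B is staged and fold-free: it first computes a list of cut lengths, then builds both outputs
-- as bulk-slice maps over zips, instead of A's single pass of dual appends with a break; alternative decomposition, same cost.


-- ===== PORT A =====
-- A's inner loop: copy element pairs one by one; stop after the first y ≥ best_acc.
-- The [] case for arry with arrx nonempty is Python's IndexError (excluded by Pre_).
def innerA : List Int → List Int → Int → List Int × List Int
  | [], _, _ => ([], [])
  | _ :: _, [], _ => ([], [])  -- IndexError in Python; outside Pre_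
  | x :: xs, y :: ys, best =>
    if best ≤ y then ([x], [y])
    else
      let t := innerA xs ys best
      (x :: t.1, y :: t.2)

def split_list_best (X : List (List Int)) (Y : List (List Int)) (best_acc : Int) : List (List Int) × List (List Int) :=
  (X.zip Y).foldl
    (fun acc p =>
      let t := innerA p.1 p.2 best_acc
      (acc.1 ++ [t.1], acc.2 ++ [t.2]))
    ([], [])

-- ===== PORT B =====
-- B's cut-length scan: 1 + index of the first y ≥ best_acc, else len(ax).
def cutLen : List Int → List Int → Int → Nat
  | [], _, _ => 0
  | _ :: _, [], _ => 0  -- IndexError in Python; outside Pre_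
  | _ :: xs, y :: ys, best => if best ≤ y then 1 else cutLen xs ys best + 1

def split_list_best_alt (X : List (List Int)) (Y : List (List Int)) (best_acc : Int) : List (List Int) × List (List Int) :=
  let cuts := (X.zip Y).map (fun p => cutLen p.1 p.2 best_acc)
  ((X.zip cuts).map (fun q => q.1.take q.2), (Y.zip cuts).map (fun q => q.1.take q.2))

-- ===== PRECONDITION & SPEC =====
-- Pre_ excludes exactly the inputs where Python A raises IndexError: a zipped pair whose
-- arry is shorter than arrx and contains no element ≥ best_acc before it runs out.
def Pre_split_list_best (X : List (List Int)) (Y : List (List Int)) (best_acc : Int) : Prop :=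
  ∀ p ∈ X.zip Y, p.1.length ≤ p.2.length ∨ ∃ y ∈ p.2, best_acc ≤ y
instance (X : List (List Int)) (Y : List (List Int)) (best_acc : Int) : Decidable (Pre_split_list_best X Y best_acc) := by unfold Pre_split_list_best; infer_instance
def pvWitness_split_list_best : List (List Int) × List (List Int) × Int := ([[1, 2, 3], [4]], [[0, 5, 0], [0]], 5)

def Spec_split_list_best (X : List (List Int)) (Y : List (List Int)) (best_acc : Int) (out : List (List Int) × List (List Int)) : Prop := out = split_list_best_alt X Y best_acc
instance (X : List (List Int)) (Y : List (List Int)) (best_acc : Int) (out : List (List Int) × List (List Int)) : Decidable (Spec_split_list_best X Y best_acc out) := by unfold Spec_split_list_best; infer_instance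

-- ===== CLAIM (what is proved, stated in full; the proofs are below) =====
def Claim_equal_split_list_best : Prop := ∀ (X : List (List Int)) (Y : List (List Int)) (best_acc : Int), Dom_split_list_best X Y best_acc → Pre_split_list_best X Y best_acc → Spec_split_list_best X Y best_acc (split_list_best X Y best_acc)

-- ===== LEMMAS AND PROOFS =====
-- A's append-accumulating fold is the pair of maps over the zipped list.
lemma foldl_pairs (best : Int) (L : List (List Int × List Int))
    (acc : List (List Int) × List (List Int)) :
    L.foldl (fun acc p => let t := innerA p.1 p.2 best;
        (acc.1 ++ [t.1], acc.2 ++ [t.2])) acc =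
    (acc.1 ++ L.map (fun p => (innerA p.1 p.2 best).1),
     acc.2 ++ L.map (fun p => (innerA p.1 p.2 best).2)) := by
  induction L generalizing acc with
  | nil => simp
  | cons p ps ih => simp [ih]

-- Per pair (inside Pre_), A's copy loop returns the two prefixes of length cutLen.
lemma innerA_take (ax ay : List Int) (best : Int)
    (h : ax.length ≤ ay.length ∨ ∃ y ∈ ay, best ≤ y) :
    innerA ax ay best = (ax.take (cutLen ax ay best), ay.take (cutLen ax ay best)) := by
  induction ax generalizing ay with
  | nil => simp [innerA, cutLen]
  | cons x xs ih =>
    cases ay with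
    | nil =>
      exfalso
      rcases h with h | ⟨y, hy, _⟩
      · simp at h
      · simp at hy
    | cons y ys =>
      by_cases hb : best ≤ y
      · simp [innerA, cutLen, hb]
      · have h' : xs.length ≤ ys.length ∨ ∃ y' ∈ ys, best ≤ y' := by
          rcases h with h | ⟨y', hy', hby'⟩
          · left; simpa using h
          · right
            rcases List.mem_cons.mp hy' with rfl | hmem
            · exact absurd hby' hb
            · exact ⟨y', hmem, hby'⟩
        simp [innerA, cutLen, hb, ih ys h']

-- Zipping a component list with the cut list is the same as mapping over the zipped pairs.
lemma zip_cuts_fst (best : Int) :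
    ∀ (X Y : List (List Int)),
    (X.zip ((X.zip Y).map (fun p => cutLen p.1 p.2 best))).map (fun q => q.1.take q.2) =
    (X.zip Y).map (fun p => p.1.take (cutLen p.1 p.2 best))
  | [], Y => by simp
  | _ :: _, [] => by simp
  | x :: xs, y :: ys => by simp [zip_cuts_fst best xs ys]

lemma zip_cuts_snd (best : Int) :
    ∀ (X Y : List (List Int)),
    (Y.zip ((X.zip Y).map (fun p => cutLen p.1 p.2 best))).map (fun q => q.1.take q.2) =
    (X.zip Y).map (fun p => p.2.take (cutLen p.1 p.2 best))
  | [], Y => by simp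
  | _ :: _, [] => by simp
  | x :: xs, y :: ys => by simp [zip_cuts_snd best xs ys]

-- ===== VERDICT (by name: the statement is the Claim_ definition above) =====
theorem split_list_best_spec : Claim_equal_split_list_best := by
  intro X Y best_acc _ hpre
  unfold Spec_split_list_best split_list_best split_list_best_alt
  dsimp only
  rw [foldl_pairs, zip_cuts_fst, zip_cuts_snd]
  simp only [List.nil_append]
  rw [Prod.mk.injEq]
  constructor <;>
  · apply List.map_congr_left
    intro p hp
    rw [innerA_take p.1 p.2 best_acc (hpre p hp)]
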